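-- pv_equiv track=rewrite | github.com/DDDEPE/Financial-Data-Analystics | hw1_pipeline/loaders.py | _choose_div_columns
-- ===== SOURCE A (Python) =====
-- def _choose_div_columns(cols):
--     """
--     배당(주당 현금배당) 컬럼 우선순위.
--     dvpsxm > dvpsx_f > dvpsx > dvps > dvpspy > dvpspq > (fallback: div/dvd/dvc 등 접두)
--     """
--     pref = ["dvpsxm", "dvpsx_f", "dvpsx", "dvps", "dvpspy", "dvpspq"]
--     fallback_prefix = ["div", "dvd", "cashdiv", "dvc"]
--
--     for p in pref:
--         if p in cols:
--             return p
--     for p in pref: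
--         cand = [c for c in cols if c.startswith(p)]
--         if cand:
--             return cand[0]
--     for fx in fallback_prefix:
--         cand = [c for c in cols if c.startswith(fx)]
--         if cand:
--             return cand[0]
--     return None
-- ===== SOURCE B (Python) =====
-- def _choose_div_columns(cols):
--     """
--     배당(주당 현금배당) 컬럼 우선순위.
--     dvpsxm > dvpsx_f > dvpsx > dvps > dvpspy > dvpspq > (fallback: div/dvd/dvc 등 접두)
--     """
--     pref = ["dvpsxm", "dvpsx_f", "dvpsx", "dvps", "dvpspy", "dvpspq"]
--     fallback_prefix = ["div", "dvd", "cashdiv", "dvc"]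
--
--     def prio(c):
--         cands = [i for i, p in enumerate(pref) if c == p]
--         cands += [6 + i for i, p in enumerate(pref) if c.startswith(p)]
--         cands += [12 + j for j, f in enumerate(fallback_prefix) if c.startswith(f)]
--         return min(cands, default=16)
--
--     best, best_p = None, 16
--     for c in cols:
--         pc = prio(c)
--         if pc < best_p:
--             best, best_p = c, pc
--     return best
-- ===== Notes on version B (the rewrite author's own statement) =====
-- stated objective: alternative
-- what changed: Replaced the three sequential scans (exact match over pref, then prefix match over pref, then fallback prefixes) by a single precompute-then-argmin pass: each column gets a numeric priority (exact pref i -> i, prefix pref i -> 6+i, fallback j -> 12+j, else 16) and one scan over cols keeps the first column with the lowest priority.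
import Mathlib
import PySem

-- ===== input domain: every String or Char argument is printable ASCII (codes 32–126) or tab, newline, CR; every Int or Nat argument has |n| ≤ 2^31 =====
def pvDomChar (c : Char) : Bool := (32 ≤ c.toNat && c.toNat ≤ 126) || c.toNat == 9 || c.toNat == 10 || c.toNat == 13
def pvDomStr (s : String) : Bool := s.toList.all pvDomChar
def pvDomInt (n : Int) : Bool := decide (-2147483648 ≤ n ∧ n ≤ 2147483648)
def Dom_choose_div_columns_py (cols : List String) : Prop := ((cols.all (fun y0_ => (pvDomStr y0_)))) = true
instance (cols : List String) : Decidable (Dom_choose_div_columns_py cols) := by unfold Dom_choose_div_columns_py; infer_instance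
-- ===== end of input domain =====

-- B replaces A's three sequential scans by one priority-per-column precompute and a single
-- first-argmin pass over cols (objective: alternative decomposition, same asymptotic cost).

-- ===== PORT A =====
-- 'for p in pref: if p in cols: return p'
def pvLoopExact : List String → List String → Option String
  | [], _ => none
  | p :: rest, cols => if cols.contains p then some p else pvLoopExact rest cols

-- 'for p in ps: cand = [c for c in cols if c.startswith(p)]; if cand: return cand[0]'
def pvLoopPrefix : List String → List String → Option String
  | [], _ => none
  | p :: rest, cols =>
    match cols.filter (fun c => PySem.Str.startswith c p) with
    | [] => pvLoopPrefix rest cols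
    | c0 :: _ => some c0

def choose_div_columns_py (cols : List String) : Option String :=
  match pvLoopExact ["dvpsxm", "dvpsx_f", "dvpsx", "dvps", "dvpspy", "dvpspq"] cols with
  | some p => some p
  | none =>
    match pvLoopPrefix ["dvpsxm", "dvpsx_f", "dvpsx", "dvps", "dvpspy", "dvpspq"] cols with
    | some c => some c
    | none => pvLoopPrefix ["div", "dvd", "cashdiv", "dvc"] cols

-- ===== PORT B =====
def pvPref : List String := ["dvpsxm", "dvpsx_f", "dvpsx", "dvps", "dvpspy", "dvpspq"]
def pvFallback : List String := ["div", "dvd", "cashdiv", "dvc"]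

-- the three candidate comprehensions of Source B's prio
def pvCands (c : String) : List Int :=
  ((PySem.List.enumerate pvPref 0).filterMap (fun ip => if c == ip.2 then some ip.1 else none))
  ++ ((PySem.List.enumerate pvPref 0).filterMap (fun ip => if PySem.Str.startswith c ip.2 then some (6 + ip.1) else none))
  ++ ((PySem.List.enumerate pvFallback 0).filterMap (fun jf => if PySem.Str.startswith c jf.2 then some (12 + jf.1) else none))

-- min(cands, default=16)
def pvPrio (c : String) : Int := PySem.List.minD (pvCands c) (fun x => x) 16

-- 'for c in cols: pc = prio(c); if pc < best_p: best, best_p = c, pc'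
def pvLoop : List String → Option String → Int → Option String
  | [], best, _ => best
  | c :: rest, best, bestP =>
    if pvPrio c < bestP then pvLoop rest (some c) (pvPrio c) else pvLoop rest best bestP

def choose_div_columns_py_alt (cols : List String) : Option String := pvLoop cols none 16

-- ===== PRECONDITION & SPEC =====
def Spec_choose_div_columns_py (cols : List String) (out : Option String) : Prop := out = choose_div_columns_py_alt cols
instance (cols : List String) (out : Option String) : Decidable (Spec_choose_div_columns_py cols out) := by unfold Spec_choose_div_columns_py; infer_instance

-- ===== CLAIM (what is proved, stated in full; the proofs are below) =====
def Claim_equal_choose_div_columns_py : Prop := ∀ (cols : List String), Dom_choose_div_columns_py cols → Spec_choose_div_columns_py cols (choose_div_columns_py cols)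

-- ===== LEMMAS AND PROOFS =====

-- what it means for k to be a candidate priority of column c
theorem mem_pvCands_iff (c : String) (k : Int) : k ∈ pvCands c ↔
    ((c = "dvpsxm" ∧ 0 = k ∨ c = "dvpsx_f" ∧ 1 = k ∨ c = "dvpsx" ∧ 2 = k ∨
      c = "dvps" ∧ 3 = k ∨ c = "dvpspy" ∧ 4 = k ∨ c = "dvpspq" ∧ 5 = k) ∨
      PySem.Chars.startswith c.toList "dvpsxm".toList = true ∧ 6 = k ∨
      PySem.Chars.startswith c.toList "dvpsx_f".toList = true ∧ 7 = k ∨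
      PySem.Chars.startswith c.toList "dvpsx".toList = true ∧ 8 = k ∨
      PySem.Chars.startswith c.toList "dvps".toList = true ∧ 9 = k ∨
      PySem.Chars.startswith c.toList "dvpspy".toList = true ∧ 10 = k ∨
      PySem.Chars.startswith c.toList "dvpspq".toList = true ∧ 11 = k) ∨
    PySem.Chars.startswith c.toList "div".toList = true ∧ 12 = k ∨
      PySem.Chars.startswith c.toList "dvd".toList = true ∧ 13 = k ∨
      PySem.Chars.startswith c.toList "cashdiv".toList = true ∧ 14 = k ∨
      PySem.Chars.startswith c.toList "dvc".toList = true ∧ 15 = k := by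
  simp only [pvCands, pvPref, pvFallback, List.mem_append, List.mem_filterMap,
    PySem.List.enumerate_cons, PySem.List.enumerate_nil, List.mem_cons, List.not_mem_nil, or_false,
    exists_eq_or_imp, exists_eq_left, PySem.Str.startswith_eq]
  norm_num

theorem pvPrio_le_mem (c : String) (k : Int) (h : k ∈ pvCands c) : pvPrio c ≤ k := by
  unfold pvPrio PySem.List.minD
  cases hm : PySem.List.min? (pvCands c) (fun x => x) with
  | none => exact absurd ((PySem.List.min?_eq_none_iff _ _).mp hm ▸ h) (List.not_mem_nil)
  | some m => simpa using PySem.List.min?_id_le hm k h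

theorem pvPrio_cases (c : String) : pvPrio c = 16 ∨ pvPrio c ∈ pvCands c := by
  unfold pvPrio PySem.List.minD
  cases hm : PySem.List.min? (pvCands c) (fun x => x) with
  | none => left; rfl
  | some m => right; simpa using PySem.List.min?_mem hm

-- priority-level characterisations
theorem pvPrio_elim (c : String) : pvPrio c = 16 ∨
    (((c = "dvpsxm" ∧ 0 = pvPrio c ∨ c = "dvpsx_f" ∧ 1 = pvPrio c ∨ c = "dvpsx" ∧ 2 = pvPrio c ∨
      c = "dvps" ∧ 3 = pvPrio c ∨ c = "dvpspy" ∧ 4 = pvPrio c ∨ c = "dvpspq" ∧ 5 = pvPrio c) ∨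
      PySem.Chars.startswith c.toList "dvpsxm".toList = true ∧ 6 = pvPrio c ∨
      PySem.Chars.startswith c.toList "dvpsx_f".toList = true ∧ 7 = pvPrio c ∨
      PySem.Chars.startswith c.toList "dvpsx".toList = true ∧ 8 = pvPrio c ∨
      PySem.Chars.startswith c.toList "dvps".toList = true ∧ 9 = pvPrio c ∨
      PySem.Chars.startswith c.toList "dvpspy".toList = true ∧ 10 = pvPrio c ∨
      PySem.Chars.startswith c.toList "dvpspq".toList = true ∧ 11 = pvPrio c) ∨
    PySem.Chars.startswith c.toList "div".toList = true ∧ 12 = pvPrio c ∨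
      PySem.Chars.startswith c.toList "dvd".toList = true ∧ 13 = pvPrio c ∨
      PySem.Chars.startswith c.toList "cashdiv".toList = true ∧ 14 = pvPrio c ∨
      PySem.Chars.startswith c.toList "dvc".toList = true ∧ 15 = pvPrio c) := by
  rcases pvPrio_cases c with h | h
  · exact Or.inl h
  · exact Or.inr ((mem_pvCands_iff c (pvPrio c)).mp h)

-- generic loop lemmas for B's argmin pass
theorem pvLoop_cons (c : String) (rest : List String) (best : Option String) (bestP : Int) :
    pvLoop (c :: rest) best bestP =
      if pvPrio c < bestP then pvLoop rest (some c) (pvPrio c) else pvLoop rest best bestP := rfl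

theorem pvLoop_skip (cs : List String) (best : Option String) (b : Int)
    (h : ∀ c ∈ cs, ¬ pvPrio c < b) : pvLoop cs best b = best := by
  induction cs with
  | nil => rfl
  | cons c rest ih =>
    rw [pvLoop_cons, if_neg (h c (by simp))]
    exact ih (fun c' hc' => h c' (by simp [hc']))

theorem pvLoop_min (cs : List String) (best : Option String) (b k : Int)
    (hkb : k < b) (hlow : ∀ c ∈ cs, k ≤ pvPrio c) (hex : ∃ c ∈ cs, pvPrio c = k) :
    pvLoop cs best b = cs.find? (fun c => pvPrio c == k) := by
  induction cs generalizing best b with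
  | nil => exact absurd hex (by simp)
  | cons c rest ih =>
    by_cases hc : pvPrio c = k
    · rw [pvLoop_cons, if_pos (by omega : pvPrio c < b)]
      simp only [List.find?_cons, hc, beq_self_eq_true]
      exact pvLoop_skip rest (some c) k (fun c' hc' => by have := hlow c' (by simp [hc']); omega)
    · have hck : ¬ (pvPrio c == k) = true := by simpa using hc
      have hklow : k ≤ pvPrio c := hlow c (by simp)
      have hex' : ∃ c' ∈ rest, pvPrio c' = k := by
        rcases hex with ⟨c', hc', he⟩
        rcases List.mem_cons.mp hc' with rfl | hm
        · exact absurd he hc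
        · exact ⟨c', hm, he⟩
      rw [pvLoop_cons]
      simp only [List.find?_cons, hck]
      have hlow' : ∀ c' ∈ rest, k ≤ pvPrio c' := fun c' hc' => hlow c' (by simp [hc'])
      by_cases hlt : pvPrio c < b
      · rw [if_pos hlt]
        exact ih (some c) (pvPrio c) (by omega) hlow' hex'
      · rw [if_neg hlt]
        exact ih best b hkb hlow' hex'

theorem pv_find?_beq_self (l : List String) (a : String) (h : a ∈ l) :
    l.find? (fun c => c == a) = some a := by
  induction l with
  | nil => exact absurd h (by simp)
  | cons c rest ih =>
    by_cases hc : c = a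
    · simp [List.find?_cons, hc]
    · have : ¬ (c == a) = true := by simpa using hc
      simp only [List.find?_cons, this]
      rcases List.mem_cons.mp h with rfl | hm
      · exact absurd rfl hc
      · exact ih hm

theorem pv_find?_congr (l : List String) (p q : String → Bool)
    (h : ∀ c ∈ l, p c = q c) : l.find? p = l.find? q := by
  induction l with
  | nil => rfl
  | cons c rest ih =>
    simp only [List.find?_cons, h c (by simp)]
    cases q c
    · exact ih (fun c' hc' => h c' (by simp [hc']))
    · rfl

theorem pvPrio_nonneg (c : String) : 0 ≤ pvPrio c := by
  rcases pvPrio_elim c with h | ((⟨h1,h2⟩|⟨h1,h2⟩|⟨h1,h2⟩|⟨h1,h2⟩|⟨h1,h2⟩|⟨h1,h2⟩) | ⟨h1,h2⟩|⟨h1,h2⟩|⟨h1,h2⟩|⟨h1,h2⟩|⟨h1,h2⟩|⟨h1,h2⟩) | ⟨h1,h2⟩|⟨h1,h2⟩|⟨h1,h2⟩|⟨h1,h2⟩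
  all_goals omega

theorem pvPrio_eqv0 (c : String) : pvPrio c = 0 ↔ c = "dvpsxm" := by
  constructor
  · intro heq
    rcases pvPrio_elim c with h | ((⟨h1,h2⟩|⟨h1,h2⟩|⟨h1,h2⟩|⟨h1,h2⟩|⟨h1,h2⟩|⟨h1,h2⟩) | ⟨h1,h2⟩|⟨h1,h2⟩|⟨h1,h2⟩|⟨h1,h2⟩|⟨h1,h2⟩|⟨h1,h2⟩) | ⟨h1,h2⟩|⟨h1,h2⟩|⟨h1,h2⟩|⟨h1,h2⟩
    all_goals first | omega | exact h1
  · rintro rfl; decide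

theorem pvPrio_eqv1 (c : String) : pvPrio c = 1 ↔ c = "dvpsx_f" := by
  constructor
  · intro heq
    rcases pvPrio_elim c with h | ((⟨h1,h2⟩|⟨h1,h2⟩|⟨h1,h2⟩|⟨h1,h2⟩|⟨h1,h2⟩|⟨h1,h2⟩) | ⟨h1,h2⟩|⟨h1,h2⟩|⟨h1,h2⟩|⟨h1,h2⟩|⟨h1,h2⟩|⟨h1,h2⟩) | ⟨h1,h2⟩|⟨h1,h2⟩|⟨h1,h2⟩|⟨h1,h2⟩
    all_goals first | omega | exact h1
  · rintro rfl; decide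

theorem pvPrio_eqv2 (c : String) : pvPrio c = 2 ↔ c = "dvpsx" := by
  constructor
  · intro heq
    rcases pvPrio_elim c with h | ((⟨h1,h2⟩|⟨h1,h2⟩|⟨h1,h2⟩|⟨h1,h2⟩|⟨h1,h2⟩|⟨h1,h2⟩) | ⟨h1,h2⟩|⟨h1,h2⟩|⟨h1,h2⟩|⟨h1,h2⟩|⟨h1,h2⟩|⟨h1,h2⟩) | ⟨h1,h2⟩|⟨h1,h2⟩|⟨h1,h2⟩|⟨h1,h2⟩
    all_goals first | omega | exact h1
  · rintro rfl; decide

theorem pvPrio_eqv3 (c : String) : pvPrio c = 3 ↔ c = "dvps" := by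
  constructor
  · intro heq
    rcases pvPrio_elim c with h | ((⟨h1,h2⟩|⟨h1,h2⟩|⟨h1,h2⟩|⟨h1,h2⟩|⟨h1,h2⟩|⟨h1,h2⟩) | ⟨h1,h2⟩|⟨h1,h2⟩|⟨h1,h2⟩|⟨h1,h2⟩|⟨h1,h2⟩|⟨h1,h2⟩) | ⟨h1,h2⟩|⟨h1,h2⟩|⟨h1,h2⟩|⟨h1,h2⟩
    all_goals first | omega | exact h1
  · rintro rfl; decide

theorem pvPrio_eqv4 (c : String) : pvPrio c = 4 ↔ c = "dvpspy" := by
  constructor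
  · intro heq
    rcases pvPrio_elim c with h | ((⟨h1,h2⟩|⟨h1,h2⟩|⟨h1,h2⟩|⟨h1,h2⟩|⟨h1,h2⟩|⟨h1,h2⟩) | ⟨h1,h2⟩|⟨h1,h2⟩|⟨h1,h2⟩|⟨h1,h2⟩|⟨h1,h2⟩|⟨h1,h2⟩) | ⟨h1,h2⟩|⟨h1,h2⟩|⟨h1,h2⟩|⟨h1,h2⟩
    all_goals first | omega | exact h1
  · rintro rfl; decide

theorem pvPrio_eqv5 (c : String) : pvPrio c = 5 ↔ c = "dvpspq" := by
  constructor
  · intro heq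
    rcases pvPrio_elim c with h | ((⟨h1,h2⟩|⟨h1,h2⟩|⟨h1,h2⟩|⟨h1,h2⟩|⟨h1,h2⟩|⟨h1,h2⟩) | ⟨h1,h2⟩|⟨h1,h2⟩|⟨h1,h2⟩|⟨h1,h2⟩|⟨h1,h2⟩|⟨h1,h2⟩) | ⟨h1,h2⟩|⟨h1,h2⟩|⟨h1,h2⟩|⟨h1,h2⟩
    all_goals first | omega | exact h1
  · rintro rfl; decide

theorem pvPrio_eqv6 (c : String) (hge : 6 ≤ pvPrio c) : pvPrio c = 6 ↔ PySem.Chars.startswith c.toList "dvpsxm".toList = true := by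
  constructor
  · intro heq
    rcases pvPrio_elim c with h | ((⟨h1,h2⟩|⟨h1,h2⟩|⟨h1,h2⟩|⟨h1,h2⟩|⟨h1,h2⟩|⟨h1,h2⟩) | ⟨h1,h2⟩|⟨h1,h2⟩|⟨h1,h2⟩|⟨h1,h2⟩|⟨h1,h2⟩|⟨h1,h2⟩) | ⟨h1,h2⟩|⟨h1,h2⟩|⟨h1,h2⟩|⟨h1,h2⟩
    all_goals first | omega | exact h1
  · intro hsw
    have hle := pvPrio_le_mem c 6 ((mem_pvCands_iff c 6).mpr (Or.inl (Or.inr (Or.inl ⟨hsw, rfl⟩))))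
    omega

theorem pvPrio_eqv7 (c : String) (hge : 7 ≤ pvPrio c) : pvPrio c = 7 ↔ PySem.Chars.startswith c.toList "dvpsx_f".toList = true := by
  constructor
  · intro heq
    rcases pvPrio_elim c with h | ((⟨h1,h2⟩|⟨h1,h2⟩|⟨h1,h2⟩|⟨h1,h2⟩|⟨h1,h2⟩|⟨h1,h2⟩) | ⟨h1,h2⟩|⟨h1,h2⟩|⟨h1,h2⟩|⟨h1,h2⟩|⟨h1,h2⟩|⟨h1,h2⟩) | ⟨h1,h2⟩|⟨h1,h2⟩|⟨h1,h2⟩|⟨h1,h2⟩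
    all_goals first | omega | exact h1
  · intro hsw
    have hle := pvPrio_le_mem c 7 ((mem_pvCands_iff c 7).mpr (Or.inl (Or.inr (Or.inr (Or.inl ⟨hsw, rfl⟩)))))
    omega

theorem pvPrio_eqv8 (c : String) (hge : 8 ≤ pvPrio c) : pvPrio c = 8 ↔ PySem.Chars.startswith c.toList "dvpsx".toList = true := by
  constructor
  · intro heq
    rcases pvPrio_elim c with h | ((⟨h1,h2⟩|⟨h1,h2⟩|⟨h1,h2⟩|⟨h1,h2⟩|⟨h1,h2⟩|⟨h1,h2⟩) | ⟨h1,h2⟩|⟨h1,h2⟩|⟨h1,h2⟩|⟨h1,h2⟩|⟨h1,h2⟩|⟨h1,h2⟩) | ⟨h1,h2⟩|⟨h1,h2⟩|⟨h1,h2⟩|⟨h1,h2⟩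
    all_goals first | omega | exact h1
  · intro hsw
    have hle := pvPrio_le_mem c 8 ((mem_pvCands_iff c 8).mpr (Or.inl (Or.inr (Or.inr (Or.inr (Or.inl ⟨hsw, rfl⟩))))))
    omega

theorem pvPrio_eqv9 (c : String) (hge : 9 ≤ pvPrio c) : pvPrio c = 9 ↔ PySem.Chars.startswith c.toList "dvps".toList = true := by
  constructor
  · intro heq
    rcases pvPrio_elim c with h | ((⟨h1,h2⟩|⟨h1,h2⟩|⟨h1,h2⟩|⟨h1,h2⟩|⟨h1,h2⟩|⟨h1,h2⟩) | ⟨h1,h2⟩|⟨h1,h2⟩|⟨h1,h2⟩|⟨h1,h2⟩|⟨h1,h2⟩|⟨h1,h2⟩) | ⟨h1,h2⟩|⟨h1,h2⟩|⟨h1,h2⟩|⟨h1,h2⟩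
    all_goals first | omega | exact h1
  · intro hsw
    have hle := pvPrio_le_mem c 9 ((mem_pvCands_iff c 9).mpr (Or.inl (Or.inr (Or.inr (Or.inr (Or.inr (Or.inl ⟨hsw, rfl⟩)))))))
    omega

theorem pvPrio_eqv10 (c : String) (hge : 10 ≤ pvPrio c) : pvPrio c = 10 ↔ PySem.Chars.startswith c.toList "dvpspy".toList = true := by
  constructor
  · intro heq
    rcases pvPrio_elim c with h | ((⟨h1,h2⟩|⟨h1,h2⟩|⟨h1,h2⟩|⟨h1,h2⟩|⟨h1,h2⟩|⟨h1,h2⟩) | ⟨h1,h2⟩|⟨h1,h2⟩|⟨h1,h2⟩|⟨h1,h2⟩|⟨h1,h2⟩|⟨h1,h2⟩) | ⟨h1,h2⟩|⟨h1,h2⟩|⟨h1,h2⟩|⟨h1,h2⟩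
    all_goals first | omega | exact h1
  · intro hsw
    have hle := pvPrio_le_mem c 10 ((mem_pvCands_iff c 10).mpr (Or.inl (Or.inr (Or.inr (Or.inr (Or.inr (Or.inr (Or.inl ⟨hsw, rfl⟩))))))))
    omega

theorem pvPrio_eqv11 (c : String) (hge : 11 ≤ pvPrio c) : pvPrio c = 11 ↔ PySem.Chars.startswith c.toList "dvpspq".toList = true := by
  constructor
  · intro heq
    rcases pvPrio_elim c with h | ((⟨h1,h2⟩|⟨h1,h2⟩|⟨h1,h2⟩|⟨h1,h2⟩|⟨h1,h2⟩|⟨h1,h2⟩) | ⟨h1,h2⟩|⟨h1,h2⟩|⟨h1,h2⟩|⟨h1,h2⟩|⟨h1,h2⟩|⟨h1,h2⟩) | ⟨h1,h2⟩|⟨h1,h2⟩|⟨h1,h2⟩|⟨h1,h2⟩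
    all_goals first | omega | exact h1
  · intro hsw
    have hle := pvPrio_le_mem c 11 ((mem_pvCands_iff c 11).mpr (Or.inl (Or.inr (Or.inr (Or.inr (Or.inr (Or.inr (Or.inr (⟨hsw, rfl⟩)))))))))
    omega

theorem pvPrio_eqv12 (c : String) (hge : 12 ≤ pvPrio c) : pvPrio c = 12 ↔ PySem.Chars.startswith c.toList "div".toList = true := by
  constructor
  · intro heq
    rcases pvPrio_elim c with h | ((⟨h1,h2⟩|⟨h1,h2⟩|⟨h1,h2⟩|⟨h1,h2⟩|⟨h1,h2⟩|⟨h1,h2⟩) | ⟨h1,h2⟩|⟨h1,h2⟩|⟨h1,h2⟩|⟨h1,h2⟩|⟨h1,h2⟩|⟨h1,h2⟩) | ⟨h1,h2⟩|⟨h1,h2⟩|⟨h1,h2⟩|⟨h1,h2⟩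
    all_goals first | omega | exact h1
  · intro hsw
    have hle := pvPrio_le_mem c 12 ((mem_pvCands_iff c 12).mpr (Or.inr (Or.inl ⟨hsw, rfl⟩)))
    omega

theorem pvPrio_eqv13 (c : String) (hge : 13 ≤ pvPrio c) : pvPrio c = 13 ↔ PySem.Chars.startswith c.toList "dvd".toList = true := by
  constructor
  · intro heq
    rcases pvPrio_elim c with h | ((⟨h1,h2⟩|⟨h1,h2⟩|⟨h1,h2⟩|⟨h1,h2⟩|⟨h1,h2⟩|⟨h1,h2⟩) | ⟨h1,h2⟩|⟨h1,h2⟩|⟨h1,h2⟩|⟨h1,h2⟩|⟨h1,h2⟩|⟨h1,h2⟩) | ⟨h1,h2⟩|⟨h1,h2⟩|⟨h1,h2⟩|⟨h1,h2⟩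
    all_goals first | omega | exact h1
  · intro hsw
    have hle := pvPrio_le_mem c 13 ((mem_pvCands_iff c 13).mpr (Or.inr (Or.inr (Or.inl ⟨hsw, rfl⟩))))
    omega

theorem pvPrio_eqv14 (c : String) (hge : 14 ≤ pvPrio c) : pvPrio c = 14 ↔ PySem.Chars.startswith c.toList "cashdiv".toList = true := by
  constructor
  · intro heq
    rcases pvPrio_elim c with h | ((⟨h1,h2⟩|⟨h1,h2⟩|⟨h1,h2⟩|⟨h1,h2⟩|⟨h1,h2⟩|⟨h1,h2⟩) | ⟨h1,h2⟩|⟨h1,h2⟩|⟨h1,h2⟩|⟨h1,h2⟩|⟨h1,h2⟩|⟨h1,h2⟩) | ⟨h1,h2⟩|⟨h1,h2⟩|⟨h1,h2⟩|⟨h1,h2⟩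
    all_goals first | omega | exact h1
  · intro hsw
    have hle := pvPrio_le_mem c 14 ((mem_pvCands_iff c 14).mpr (Or.inr (Or.inr (Or.inr (Or.inl ⟨hsw, rfl⟩)))))
    omega

theorem pvPrio_eqv15 (c : String) (hge : 15 ≤ pvPrio c) : pvPrio c = 15 ↔ PySem.Chars.startswith c.toList "dvc".toList = true := by
  constructor
  · intro heq
    rcases pvPrio_elim c with h | ((⟨h1,h2⟩|⟨h1,h2⟩|⟨h1,h2⟩|⟨h1,h2⟩|⟨h1,h2⟩|⟨h1,h2⟩) | ⟨h1,h2⟩|⟨h1,h2⟩|⟨h1,h2⟩|⟨h1,h2⟩|⟨h1,h2⟩|⟨h1,h2⟩) | ⟨h1,h2⟩|⟨h1,h2⟩|⟨h1,h2⟩|⟨h1,h2⟩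
    all_goals first | omega | exact h1
  · intro hsw
    have hle := pvPrio_le_mem c 15 ((mem_pvCands_iff c 15).mpr (Or.inr (Or.inr (Or.inr (Or.inr (⟨hsw, rfl⟩))))))
    omega

-- ===== VERDICT (by name: the statement is the Claim_ definition above) =====
theorem choose_div_columns_py_spec : Claim_equal_choose_div_columns_py := by
  intro cols _
  unfold Spec_choose_div_columns_py
  have hlow0 : ∀ c ∈ cols, (0:Int) ≤ pvPrio c := fun c _ => pvPrio_nonneg c
  by_cases hE0 : "dvpsxm" ∈ cols
  · have hA : choose_div_columns_py cols = some "dvpsxm" := by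
      simp [choose_div_columns_py, pvLoopExact, hE0]
    have hBv : choose_div_columns_py_alt cols = cols.find? (fun c => pvPrio c == 0) :=
      pvLoop_min cols none 16 0 (by norm_num) hlow0 ⟨"dvpsxm", hE0, by decide⟩
    have hcg : cols.find? (fun c => pvPrio c == 0) = cols.find? (fun c => c == "dvpsxm") :=
      pv_find?_congr cols _ _ (fun c hc => by rw [Bool.eq_iff_iff]; simp only [beq_iff_eq]; exact pvPrio_eqv0 c)
    rw [hA, hBv, hcg, pv_find?_beq_self cols _ hE0]
  · have hne0 : ∀ c ∈ cols, pvPrio c ≠ 0 := fun c hc heq => hE0 ((pvPrio_eqv0 c).mp heq ▸ hc)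
    have hlow1 : ∀ c ∈ cols, (1:Int) ≤ pvPrio c := fun c hc => by have a1 := hlow0 c hc; have a2 := hne0 c hc; omega
    by_cases hE1 : "dvpsx_f" ∈ cols
    · have hA : choose_div_columns_py cols = some "dvpsx_f" := by
        simp [choose_div_columns_py, pvLoopExact, hE0, hE1]
      have hBv : choose_div_columns_py_alt cols = cols.find? (fun c => pvPrio c == 1) :=
        pvLoop_min cols none 16 1 (by norm_num) hlow1 ⟨"dvpsx_f", hE1, by decide⟩
      have hcg : cols.find? (fun c => pvPrio c == 1) = cols.find? (fun c => c == "dvpsx_f") :=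
        pv_find?_congr cols _ _ (fun c hc => by rw [Bool.eq_iff_iff]; simp only [beq_iff_eq]; exact pvPrio_eqv1 c)
      rw [hA, hBv, hcg, pv_find?_beq_self cols _ hE1]
    · have hne1 : ∀ c ∈ cols, pvPrio c ≠ 1 := fun c hc heq => hE1 ((pvPrio_eqv1 c).mp heq ▸ hc)
      have hlow2 : ∀ c ∈ cols, (2:Int) ≤ pvPrio c := fun c hc => by have a1 := hlow1 c hc; have a2 := hne1 c hc; omega
      by_cases hE2 : "dvpsx" ∈ cols
      · have hA : choose_div_columns_py cols = some "dvpsx" := by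
          simp [choose_div_columns_py, pvLoopExact, hE0, hE1, hE2]
        have hBv : choose_div_columns_py_alt cols = cols.find? (fun c => pvPrio c == 2) :=
          pvLoop_min cols none 16 2 (by norm_num) hlow2 ⟨"dvpsx", hE2, by decide⟩
        have hcg : cols.find? (fun c => pvPrio c == 2) = cols.find? (fun c => c == "dvpsx") :=
          pv_find?_congr cols _ _ (fun c hc => by rw [Bool.eq_iff_iff]; simp only [beq_iff_eq]; exact pvPrio_eqv2 c)
        rw [hA, hBv, hcg, pv_find?_beq_self cols _ hE2]
      · have hne2 : ∀ c ∈ cols, pvPrio c ≠ 2 := fun c hc heq => hE2 ((pvPrio_eqv2 c).mp heq ▸ hc)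
        have hlow3 : ∀ c ∈ cols, (3:Int) ≤ pvPrio c := fun c hc => by have a1 := hlow2 c hc; have a2 := hne2 c hc; omega
        by_cases hE3 : "dvps" ∈ cols
        · have hA : choose_div_columns_py cols = some "dvps" := by
            simp [choose_div_columns_py, pvLoopExact, hE0, hE1, hE2, hE3]
          have hBv : choose_div_columns_py_alt cols = cols.find? (fun c => pvPrio c == 3) :=
            pvLoop_min cols none 16 3 (by norm_num) hlow3 ⟨"dvps", hE3, by decide⟩
          have hcg : cols.find? (fun c => pvPrio c == 3) = cols.find? (fun c => c == "dvps") :=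
            pv_find?_congr cols _ _ (fun c hc => by rw [Bool.eq_iff_iff]; simp only [beq_iff_eq]; exact pvPrio_eqv3 c)
          rw [hA, hBv, hcg, pv_find?_beq_self cols _ hE3]
        · have hne3 : ∀ c ∈ cols, pvPrio c ≠ 3 := fun c hc heq => hE3 ((pvPrio_eqv3 c).mp heq ▸ hc)
          have hlow4 : ∀ c ∈ cols, (4:Int) ≤ pvPrio c := fun c hc => by have a1 := hlow3 c hc; have a2 := hne3 c hc; omega
          by_cases hE4 : "dvpspy" ∈ cols
          · have hA : choose_div_columns_py cols = some "dvpspy" := by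
              simp [choose_div_columns_py, pvLoopExact, hE0, hE1, hE2, hE3, hE4]
            have hBv : choose_div_columns_py_alt cols = cols.find? (fun c => pvPrio c == 4) :=
              pvLoop_min cols none 16 4 (by norm_num) hlow4 ⟨"dvpspy", hE4, by decide⟩
            have hcg : cols.find? (fun c => pvPrio c == 4) = cols.find? (fun c => c == "dvpspy") :=
              pv_find?_congr cols _ _ (fun c hc => by rw [Bool.eq_iff_iff]; simp only [beq_iff_eq]; exact pvPrio_eqv4 c)
            rw [hA, hBv, hcg, pv_find?_beq_self cols _ hE4]
          · have hne4 : ∀ c ∈ cols, pvPrio c ≠ 4 := fun c hc heq => hE4 ((pvPrio_eqv4 c).mp heq ▸ hc)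
            have hlow5 : ∀ c ∈ cols, (5:Int) ≤ pvPrio c := fun c hc => by have a1 := hlow4 c hc; have a2 := hne4 c hc; omega
            by_cases hE5 : "dvpspq" ∈ cols
            · have hA : choose_div_columns_py cols = some "dvpspq" := by
                simp [choose_div_columns_py, pvLoopExact, hE0, hE1, hE2, hE3, hE4, hE5]
              have hBv : choose_div_columns_py_alt cols = cols.find? (fun c => pvPrio c == 5) :=
                pvLoop_min cols none 16 5 (by norm_num) hlow5 ⟨"dvpspq", hE5, by decide⟩
              have hcg : cols.find? (fun c => pvPrio c == 5) = cols.find? (fun c => c == "dvpspq") :=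
                pv_find?_congr cols _ _ (fun c hc => by rw [Bool.eq_iff_iff]; simp only [beq_iff_eq]; exact pvPrio_eqv5 c)
              rw [hA, hBv, hcg, pv_find?_beq_self cols _ hE5]
            · have hne5 : ∀ c ∈ cols, pvPrio c ≠ 5 := fun c hc heq => hE5 ((pvPrio_eqv5 c).mp heq ▸ hc)
              have hlow6 : ∀ c ∈ cols, (6:Int) ≤ pvPrio c := fun c hc => by have a1 := hlow5 c hc; have a2 := hne5 c hc; omega
              by_cases hP6 : ∃ c ∈ cols, PySem.Chars.startswith c.toList "dvpsxm".toList = true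
              · rcases hP6 with ⟨w, hw, hws⟩
                have hBv : choose_div_columns_py_alt cols = cols.find? (fun c => pvPrio c == 6) :=
                  pvLoop_min cols none 16 6 (by norm_num) hlow6 ⟨w, hw, (pvPrio_eqv6 w (hlow6 w hw)).mpr hws⟩
                have hcg : cols.find? (fun c => pvPrio c == 6) = cols.find? (fun c => PySem.Chars.startswith c.toList ['d', 'v', 'p', 's', 'x', 'm']) :=
                  pv_find?_congr cols _ _ (fun c hc => by
                    rw [Bool.eq_iff_iff]; simp only [beq_iff_eq]; exact pvPrio_eqv6 c (hlow6 c hc))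
                rcases hfe : cols.filter (fun c => PySem.Chars.startswith c.toList ['d', 'v', 'p', 's', 'x', 'm']) with _ | ⟨c0, tl⟩
                · exfalso; rw [List.filter_eq_nil_iff] at hfe; exact hfe w hw (by simpa using hws)
                · have hA : choose_div_columns_py cols = some c0 := by
                    simp [choose_div_columns_py, pvLoopExact, hE0, hE1, hE2, hE3, hE4, hE5, pvLoopPrefix, hfe]
                  have hfd : cols.find? (fun c => PySem.Chars.startswith c.toList ['d', 'v', 'p', 's', 'x', 'm']) = some c0 := by
                    rw [← List.head?_filter, hfe]; rfl
                  rw [hA, hBv, hcg, hfd]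
              · have hPf6 : cols.filter (fun c => PySem.Chars.startswith c.toList ['d', 'v', 'p', 's', 'x', 'm']) = [] :=
                  List.filter_eq_nil_iff.mpr (fun a ha hsa => hP6 ⟨a, ha, by simpa using hsa⟩)
                have hne6 : ∀ c ∈ cols, pvPrio c ≠ 6 := fun c hc heq => hP6 ⟨c, hc, (pvPrio_eqv6 c (hlow6 c hc)).mp heq⟩
                have hlow7 : ∀ c ∈ cols, (7:Int) ≤ pvPrio c := fun c hc => by have a1 := hlow6 c hc; have a2 := hne6 c hc; omega
                by_cases hP7 : ∃ c ∈ cols, PySem.Chars.startswith c.toList "dvpsx_f".toList = true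
                · rcases hP7 with ⟨w, hw, hws⟩
                  have hBv : choose_div_columns_py_alt cols = cols.find? (fun c => pvPrio c == 7) :=
                    pvLoop_min cols none 16 7 (by norm_num) hlow7 ⟨w, hw, (pvPrio_eqv7 w (hlow7 w hw)).mpr hws⟩
                  have hcg : cols.find? (fun c => pvPrio c == 7) = cols.find? (fun c => PySem.Chars.startswith c.toList ['d', 'v', 'p', 's', 'x', '_', 'f']) :=
                    pv_find?_congr cols _ _ (fun c hc => by
                      rw [Bool.eq_iff_iff]; simp only [beq_iff_eq]; exact pvPrio_eqv7 c (hlow7 c hc))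
                  rcases hfe : cols.filter (fun c => PySem.Chars.startswith c.toList ['d', 'v', 'p', 's', 'x', '_', 'f']) with _ | ⟨c0, tl⟩
                  · exfalso; rw [List.filter_eq_nil_iff] at hfe; exact hfe w hw (by simpa using hws)
                  · have hA : choose_div_columns_py cols = some c0 := by
                      simp [choose_div_columns_py, pvLoopExact, hE0, hE1, hE2, hE3, hE4, hE5, pvLoopPrefix, hPf6, hfe]
                    have hfd : cols.find? (fun c => PySem.Chars.startswith c.toList ['d', 'v', 'p', 's', 'x', '_', 'f']) = some c0 := by
                      rw [← List.head?_filter, hfe]; rfl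
                    rw [hA, hBv, hcg, hfd]
                · have hPf7 : cols.filter (fun c => PySem.Chars.startswith c.toList ['d', 'v', 'p', 's', 'x', '_', 'f']) = [] :=
                    List.filter_eq_nil_iff.mpr (fun a ha hsa => hP7 ⟨a, ha, by simpa using hsa⟩)
                  have hne7 : ∀ c ∈ cols, pvPrio c ≠ 7 := fun c hc heq => hP7 ⟨c, hc, (pvPrio_eqv7 c (hlow7 c hc)).mp heq⟩
                  have hlow8 : ∀ c ∈ cols, (8:Int) ≤ pvPrio c := fun c hc => by have a1 := hlow7 c hc; have a2 := hne7 c hc; omega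
                  by_cases hP8 : ∃ c ∈ cols, PySem.Chars.startswith c.toList "dvpsx".toList = true
                  · rcases hP8 with ⟨w, hw, hws⟩
                    have hBv : choose_div_columns_py_alt cols = cols.find? (fun c => pvPrio c == 8) :=
                      pvLoop_min cols none 16 8 (by norm_num) hlow8 ⟨w, hw, (pvPrio_eqv8 w (hlow8 w hw)).mpr hws⟩
                    have hcg : cols.find? (fun c => pvPrio c == 8) = cols.find? (fun c => PySem.Chars.startswith c.toList ['d', 'v', 'p', 's', 'x']) :=
                      pv_find?_congr cols _ _ (fun c hc => by
                        rw [Bool.eq_iff_iff]; simp only [beq_iff_eq]; exact pvPrio_eqv8 c (hlow8 c hc))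
                    rcases hfe : cols.filter (fun c => PySem.Chars.startswith c.toList ['d', 'v', 'p', 's', 'x']) with _ | ⟨c0, tl⟩
                    · exfalso; rw [List.filter_eq_nil_iff] at hfe; exact hfe w hw (by simpa using hws)
                    · have hA : choose_div_columns_py cols = some c0 := by
                        simp [choose_div_columns_py, pvLoopExact, hE0, hE1, hE2, hE3, hE4, hE5, pvLoopPrefix, hPf6, hPf7, hfe]
                      have hfd : cols.find? (fun c => PySem.Chars.startswith c.toList ['d', 'v', 'p', 's', 'x']) = some c0 := by
                        rw [← List.head?_filter, hfe]; rfl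
                      rw [hA, hBv, hcg, hfd]
                  · have hPf8 : cols.filter (fun c => PySem.Chars.startswith c.toList ['d', 'v', 'p', 's', 'x']) = [] :=
                      List.filter_eq_nil_iff.mpr (fun a ha hsa => hP8 ⟨a, ha, by simpa using hsa⟩)
                    have hne8 : ∀ c ∈ cols, pvPrio c ≠ 8 := fun c hc heq => hP8 ⟨c, hc, (pvPrio_eqv8 c (hlow8 c hc)).mp heq⟩
                    have hlow9 : ∀ c ∈ cols, (9:Int) ≤ pvPrio c := fun c hc => by have a1 := hlow8 c hc; have a2 := hne8 c hc; omega
                    by_cases hP9 : ∃ c ∈ cols, PySem.Chars.startswith c.toList "dvps".toList = true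
                    · rcases hP9 with ⟨w, hw, hws⟩
                      have hBv : choose_div_columns_py_alt cols = cols.find? (fun c => pvPrio c == 9) :=
                        pvLoop_min cols none 16 9 (by norm_num) hlow9 ⟨w, hw, (pvPrio_eqv9 w (hlow9 w hw)).mpr hws⟩
                      have hcg : cols.find? (fun c => pvPrio c == 9) = cols.find? (fun c => PySem.Chars.startswith c.toList ['d', 'v', 'p', 's']) :=
                        pv_find?_congr cols _ _ (fun c hc => by
                          rw [Bool.eq_iff_iff]; simp only [beq_iff_eq]; exact pvPrio_eqv9 c (hlow9 c hc))
                      rcases hfe : cols.filter (fun c => PySem.Chars.startswith c.toList ['d', 'v', 'p', 's']) with _ | ⟨c0, tl⟩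
                      · exfalso; rw [List.filter_eq_nil_iff] at hfe; exact hfe w hw (by simpa using hws)
                      · have hA : choose_div_columns_py cols = some c0 := by
                          simp [choose_div_columns_py, pvLoopExact, hE0, hE1, hE2, hE3, hE4, hE5, pvLoopPrefix, hPf6, hPf7, hPf8, hfe]
                        have hfd : cols.find? (fun c => PySem.Chars.startswith c.toList ['d', 'v', 'p', 's']) = some c0 := by
                          rw [← List.head?_filter, hfe]; rfl
                        rw [hA, hBv, hcg, hfd]
                    · have hPf9 : cols.filter (fun c => PySem.Chars.startswith c.toList ['d', 'v', 'p', 's']) = [] :=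
                        List.filter_eq_nil_iff.mpr (fun a ha hsa => hP9 ⟨a, ha, by simpa using hsa⟩)
                      have hne9 : ∀ c ∈ cols, pvPrio c ≠ 9 := fun c hc heq => hP9 ⟨c, hc, (pvPrio_eqv9 c (hlow9 c hc)).mp heq⟩
                      have hlow10 : ∀ c ∈ cols, (10:Int) ≤ pvPrio c := fun c hc => by have a1 := hlow9 c hc; have a2 := hne9 c hc; omega
                      by_cases hP10 : ∃ c ∈ cols, PySem.Chars.startswith c.toList "dvpspy".toList = true
                      · rcases hP10 with ⟨w, hw, hws⟩
                        have hBv : choose_div_columns_py_alt cols = cols.find? (fun c => pvPrio c == 10) :=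
                          pvLoop_min cols none 16 10 (by norm_num) hlow10 ⟨w, hw, (pvPrio_eqv10 w (hlow10 w hw)).mpr hws⟩
                        have hcg : cols.find? (fun c => pvPrio c == 10) = cols.find? (fun c => PySem.Chars.startswith c.toList ['d', 'v', 'p', 's', 'p', 'y']) :=
                          pv_find?_congr cols _ _ (fun c hc => by
                            rw [Bool.eq_iff_iff]; simp only [beq_iff_eq]; exact pvPrio_eqv10 c (hlow10 c hc))
                        rcases hfe : cols.filter (fun c => PySem.Chars.startswith c.toList ['d', 'v', 'p', 's', 'p', 'y']) with _ | ⟨c0, tl⟩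
                        · exfalso; rw [List.filter_eq_nil_iff] at hfe; exact hfe w hw (by simpa using hws)
                        · have hA : choose_div_columns_py cols = some c0 := by
                            simp [choose_div_columns_py, pvLoopExact, hE0, hE1, hE2, hE3, hE4, hE5, pvLoopPrefix, hPf6, hPf7, hPf8, hPf9, hfe]
                          have hfd : cols.find? (fun c => PySem.Chars.startswith c.toList ['d', 'v', 'p', 's', 'p', 'y']) = some c0 := by
                            rw [← List.head?_filter, hfe]; rfl
                          rw [hA, hBv, hcg, hfd]
                      · have hPf10 : cols.filter (fun c => PySem.Chars.startswith c.toList ['d', 'v', 'p', 's', 'p', 'y']) = [] :=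
                          List.filter_eq_nil_iff.mpr (fun a ha hsa => hP10 ⟨a, ha, by simpa using hsa⟩)
                        have hne10 : ∀ c ∈ cols, pvPrio c ≠ 10 := fun c hc heq => hP10 ⟨c, hc, (pvPrio_eqv10 c (hlow10 c hc)).mp heq⟩
                        have hlow11 : ∀ c ∈ cols, (11:Int) ≤ pvPrio c := fun c hc => by have a1 := hlow10 c hc; have a2 := hne10 c hc; omega
                        by_cases hP11 : ∃ c ∈ cols, PySem.Chars.startswith c.toList "dvpspq".toList = true
                        · rcases hP11 with ⟨w, hw, hws⟩
                          have hBv : choose_div_columns_py_alt cols = cols.find? (fun c => pvPrio c == 11) :=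
                            pvLoop_min cols none 16 11 (by norm_num) hlow11 ⟨w, hw, (pvPrio_eqv11 w (hlow11 w hw)).mpr hws⟩
                          have hcg : cols.find? (fun c => pvPrio c == 11) = cols.find? (fun c => PySem.Chars.startswith c.toList ['d', 'v', 'p', 's', 'p', 'q']) :=
                            pv_find?_congr cols _ _ (fun c hc => by
                              rw [Bool.eq_iff_iff]; simp only [beq_iff_eq]; exact pvPrio_eqv11 c (hlow11 c hc))
                          rcases hfe : cols.filter (fun c => PySem.Chars.startswith c.toList ['d', 'v', 'p', 's', 'p', 'q']) with _ | ⟨c0, tl⟩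
                          · exfalso; rw [List.filter_eq_nil_iff] at hfe; exact hfe w hw (by simpa using hws)
                          · have hA : choose_div_columns_py cols = some c0 := by
                              simp [choose_div_columns_py, pvLoopExact, hE0, hE1, hE2, hE3, hE4, hE5, pvLoopPrefix, hPf6, hPf7, hPf8, hPf9, hPf10, hfe]
                            have hfd : cols.find? (fun c => PySem.Chars.startswith c.toList ['d', 'v', 'p', 's', 'p', 'q']) = some c0 := by
                              rw [← List.head?_filter, hfe]; rfl
                            rw [hA, hBv, hcg, hfd]
                        · have hPf11 : cols.filter (fun c => PySem.Chars.startswith c.toList ['d', 'v', 'p', 's', 'p', 'q']) = [] :=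
                            List.filter_eq_nil_iff.mpr (fun a ha hsa => hP11 ⟨a, ha, by simpa using hsa⟩)
                          have hne11 : ∀ c ∈ cols, pvPrio c ≠ 11 := fun c hc heq => hP11 ⟨c, hc, (pvPrio_eqv11 c (hlow11 c hc)).mp heq⟩
                          have hlow12 : ∀ c ∈ cols, (12:Int) ≤ pvPrio c := fun c hc => by have a1 := hlow11 c hc; have a2 := hne11 c hc; omega
                          by_cases hP12 : ∃ c ∈ cols, PySem.Chars.startswith c.toList "div".toList = true
                          · rcases hP12 with ⟨w, hw, hws⟩
                            have hBv : choose_div_columns_py_alt cols = cols.find? (fun c => pvPrio c == 12) :=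
                              pvLoop_min cols none 16 12 (by norm_num) hlow12 ⟨w, hw, (pvPrio_eqv12 w (hlow12 w hw)).mpr hws⟩
                            have hcg : cols.find? (fun c => pvPrio c == 12) = cols.find? (fun c => PySem.Chars.startswith c.toList ['d', 'i', 'v']) :=
                              pv_find?_congr cols _ _ (fun c hc => by
                                rw [Bool.eq_iff_iff]; simp only [beq_iff_eq]; exact pvPrio_eqv12 c (hlow12 c hc))
                            rcases hfe : cols.filter (fun c => PySem.Chars.startswith c.toList ['d', 'i', 'v']) with _ | ⟨c0, tl⟩
                            · exfalso; rw [List.filter_eq_nil_iff] at hfe; exact hfe w hw (by simpa using hws)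
                            · have hA : choose_div_columns_py cols = some c0 := by
                                simp [choose_div_columns_py, pvLoopExact, hE0, hE1, hE2, hE3, hE4, hE5, pvLoopPrefix, hPf6, hPf7, hPf8, hPf9, hPf10, hPf11, hfe]
                              have hfd : cols.find? (fun c => PySem.Chars.startswith c.toList ['d', 'i', 'v']) = some c0 := by
                                rw [← List.head?_filter, hfe]; rfl
                              rw [hA, hBv, hcg, hfd]
                          · have hPf12 : cols.filter (fun c => PySem.Chars.startswith c.toList ['d', 'i', 'v']) = [] :=
                              List.filter_eq_nil_iff.mpr (fun a ha hsa => hP12 ⟨a, ha, by simpa using hsa⟩)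
                            have hne12 : ∀ c ∈ cols, pvPrio c ≠ 12 := fun c hc heq => hP12 ⟨c, hc, (pvPrio_eqv12 c (hlow12 c hc)).mp heq⟩
                            have hlow13 : ∀ c ∈ cols, (13:Int) ≤ pvPrio c := fun c hc => by have a1 := hlow12 c hc; have a2 := hne12 c hc; omega
                            by_cases hP13 : ∃ c ∈ cols, PySem.Chars.startswith c.toList "dvd".toList = true
                            · rcases hP13 with ⟨w, hw, hws⟩
                              have hBv : choose_div_columns_py_alt cols = cols.find? (fun c => pvPrio c == 13) :=
                                pvLoop_min cols none 16 13 (by norm_num) hlow13 ⟨w, hw, (pvPrio_eqv13 w (hlow13 w hw)).mpr hws⟩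
                              have hcg : cols.find? (fun c => pvPrio c == 13) = cols.find? (fun c => PySem.Chars.startswith c.toList ['d', 'v', 'd']) :=
                                pv_find?_congr cols _ _ (fun c hc => by
                                  rw [Bool.eq_iff_iff]; simp only [beq_iff_eq]; exact pvPrio_eqv13 c (hlow13 c hc))
                              rcases hfe : cols.filter (fun c => PySem.Chars.startswith c.toList ['d', 'v', 'd']) with _ | ⟨c0, tl⟩
                              · exfalso; rw [List.filter_eq_nil_iff] at hfe; exact hfe w hw (by simpa using hws)
                              · have hA : choose_div_columns_py cols = some c0 := by
                                  simp [choose_div_columns_py, pvLoopExact, hE0, hE1, hE2, hE3, hE4, hE5, pvLoopPrefix, hPf6, hPf7, hPf8, hPf9, hPf10, hPf11, hPf12, hfe]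
                                have hfd : cols.find? (fun c => PySem.Chars.startswith c.toList ['d', 'v', 'd']) = some c0 := by
                                  rw [← List.head?_filter, hfe]; rfl
                                rw [hA, hBv, hcg, hfd]
                            · have hPf13 : cols.filter (fun c => PySem.Chars.startswith c.toList ['d', 'v', 'd']) = [] :=
                                List.filter_eq_nil_iff.mpr (fun a ha hsa => hP13 ⟨a, ha, by simpa using hsa⟩)
                              have hne13 : ∀ c ∈ cols, pvPrio c ≠ 13 := fun c hc heq => hP13 ⟨c, hc, (pvPrio_eqv13 c (hlow13 c hc)).mp heq⟩
                              have hlow14 : ∀ c ∈ cols, (14:Int) ≤ pvPrio c := fun c hc => by have a1 := hlow13 c hc; have a2 := hne13 c hc; omega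
                              by_cases hP14 : ∃ c ∈ cols, PySem.Chars.startswith c.toList "cashdiv".toList = true
                              · rcases hP14 with ⟨w, hw, hws⟩
                                have hBv : choose_div_columns_py_alt cols = cols.find? (fun c => pvPrio c == 14) :=
                                  pvLoop_min cols none 16 14 (by norm_num) hlow14 ⟨w, hw, (pvPrio_eqv14 w (hlow14 w hw)).mpr hws⟩
                                have hcg : cols.find? (fun c => pvPrio c == 14) = cols.find? (fun c => PySem.Chars.startswith c.toList ['c', 'a', 's', 'h', 'd', 'i', 'v']) :=
                                  pv_find?_congr cols _ _ (fun c hc => by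
                                    rw [Bool.eq_iff_iff]; simp only [beq_iff_eq]; exact pvPrio_eqv14 c (hlow14 c hc))
                                rcases hfe : cols.filter (fun c => PySem.Chars.startswith c.toList ['c', 'a', 's', 'h', 'd', 'i', 'v']) with _ | ⟨c0, tl⟩
                                · exfalso; rw [List.filter_eq_nil_iff] at hfe; exact hfe w hw (by simpa using hws)
                                · have hA : choose_div_columns_py cols = some c0 := by
                                    simp [choose_div_columns_py, pvLoopExact, hE0, hE1, hE2, hE3, hE4, hE5, pvLoopPrefix, hPf6, hPf7, hPf8, hPf9, hPf10, hPf11, hPf12, hPf13, hfe]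
                                  have hfd : cols.find? (fun c => PySem.Chars.startswith c.toList ['c', 'a', 's', 'h', 'd', 'i', 'v']) = some c0 := by
                                    rw [← List.head?_filter, hfe]; rfl
                                  rw [hA, hBv, hcg, hfd]
                              · have hPf14 : cols.filter (fun c => PySem.Chars.startswith c.toList ['c', 'a', 's', 'h', 'd', 'i', 'v']) = [] :=
                                  List.filter_eq_nil_iff.mpr (fun a ha hsa => hP14 ⟨a, ha, by simpa using hsa⟩)
                                have hne14 : ∀ c ∈ cols, pvPrio c ≠ 14 := fun c hc heq => hP14 ⟨c, hc, (pvPrio_eqv14 c (hlow14 c hc)).mp heq⟩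
                                have hlow15 : ∀ c ∈ cols, (15:Int) ≤ pvPrio c := fun c hc => by have a1 := hlow14 c hc; have a2 := hne14 c hc; omega
                                by_cases hP15 : ∃ c ∈ cols, PySem.Chars.startswith c.toList "dvc".toList = true
                                · rcases hP15 with ⟨w, hw, hws⟩
                                  have hBv : choose_div_columns_py_alt cols = cols.find? (fun c => pvPrio c == 15) :=
                                    pvLoop_min cols none 16 15 (by norm_num) hlow15 ⟨w, hw, (pvPrio_eqv15 w (hlow15 w hw)).mpr hws⟩
                                  have hcg : cols.find? (fun c => pvPrio c == 15) = cols.find? (fun c => PySem.Chars.startswith c.toList ['d', 'v', 'c']) :=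
                                    pv_find?_congr cols _ _ (fun c hc => by
                                      rw [Bool.eq_iff_iff]; simp only [beq_iff_eq]; exact pvPrio_eqv15 c (hlow15 c hc))
                                  rcases hfe : cols.filter (fun c => PySem.Chars.startswith c.toList ['d', 'v', 'c']) with _ | ⟨c0, tl⟩
                                  · exfalso; rw [List.filter_eq_nil_iff] at hfe; exact hfe w hw (by simpa using hws)
                                  · have hA : choose_div_columns_py cols = some c0 := by
                                      simp [choose_div_columns_py, pvLoopExact, hE0, hE1, hE2, hE3, hE4, hE5, pvLoopPrefix, hPf6, hPf7, hPf8, hPf9, hPf10, hPf11, hPf12, hPf13, hPf14, hfe]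
                                    have hfd : cols.find? (fun c => PySem.Chars.startswith c.toList ['d', 'v', 'c']) = some c0 := by
                                      rw [← List.head?_filter, hfe]; rfl
                                    rw [hA, hBv, hcg, hfd]
                                · have hPf15 : cols.filter (fun c => PySem.Chars.startswith c.toList ['d', 'v', 'c']) = [] :=
                                    List.filter_eq_nil_iff.mpr (fun a ha hsa => hP15 ⟨a, ha, by simpa using hsa⟩)
                                  have hne15 : ∀ c ∈ cols, pvPrio c ≠ 15 := fun c hc heq => hP15 ⟨c, hc, (pvPrio_eqv15 c (hlow15 c hc)).mp heq⟩
                                  have hlow16 : ∀ c ∈ cols, (16:Int) ≤ pvPrio c := fun c hc => by have a1 := hlow15 c hc; have a2 := hne15 c hc; omega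
                                  have hA : choose_div_columns_py cols = none := by
                                    simp [choose_div_columns_py, pvLoopExact, hE0, hE1, hE2, hE3, hE4, hE5, pvLoopPrefix, hPf6, hPf7, hPf8, hPf9, hPf10, hPf11, hPf12, hPf13, hPf14, hPf15]
                                  have hBv : choose_div_columns_py_alt cols = none :=
                                    pvLoop_skip cols none 16 (fun c hc hlt => by have := hlow16 c hc; omega)
                                  rw [hA, hBv]
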